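-- pv_equiv track=rewrite | github.com/hsncoskun1/polymax | tools/refresh_gamma_snapshot.py | summarize_shape
-- ===== SOURCE A (Python) =====
-- from typing import Any
--
-- REQUIRED_FIELDS: list[str] = [
--     "id",            # absent → record skipped entirely
--     "active",        # absent → defaults False; INACTIVE rule may miscategorise
--     "closed",        # absent → defaults False; INACTIVE rule may miscategorise
--     "startDate",     # absent → source_timestamp=None → MISSING_DATES rejection
--     "endDate",       # absent → end_date=None → MISSING_DATES rejection
--     "enableOrderBook",  # absent → None → NO_ORDER_BOOK rejection (conservative)
--     "tokens",        # absent → None → EMPTY_TOKENS rejection (conservative)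
-- ]
--
-- OPTIONAL_FIELDS: list[str] = [
--     "question",   # absent → "" (empty string; symbol extraction falls back)
--     "slug",       # absent → None (mapper falls back to market_id)
--     "events",     # absent → event_id=None (not a rejection criterion)
-- ]
--
-- def check_required_fields(records: list[dict[str, Any]]) -> list[str]:
--     """Return REQUIRED_FIELDS absent from ALL records (breaking drift).
--
--     A field is reported only when it is missing from every record in the
--     sample — a single record containing it is enough to pass the check.
--     An empty return list means shape validation passed.
--     """
--     if not records:
--         return list(REQUIRED_FIELDS)
--     return [f for f in REQUIRED_FIELDS if not any(f in r for r in records)]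
--
-- def check_optional_fields(records: list[dict[str, Any]]) -> list[str]:
--     """Return OPTIONAL_FIELDS absent from ALL records (expected drift)."""
--     if not records:
--         return list(OPTIONAL_FIELDS)
--     return [f for f in OPTIONAL_FIELDS if not any(f in r for r in records)]
--
-- def summarize_shape(records: list[dict[str, Any]]) -> str:
--     """Return a human-readable shape summary string."""
--     if not records:
--         return "  [WARN] No records returned from API."
--
--     all_keys: set[str] = set()
--     for r in records:
--         all_keys |= set(r.keys())
--
--     lines: list[str] = [
--         f"  Records fetched   : {len(records)}",
--         f"  All top-level keys: {sorted(all_keys)}",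
--         "",
--     ]
--
--     missing_required = check_required_fields(records)
--     if missing_required:
--         lines.append(
--             f"  [BREAKING DRIFT] Required fields absent from all records: {missing_required}"
--         )
--     else:
--         lines.append("  [OK] All required fields present in at least one record.")
--
--     missing_optional = check_optional_fields(records)
--     if missing_optional:
--         lines.append(
--             f"  [EXPECTED DRIFT?] Optional fields absent from all records: {missing_optional}"
--         )
--     else:
--         lines.append("  [OK] All optional fields present.")
--
--     return "\n".join(lines)
-- ===== SOURCE B (Python) =====
-- REQUIRED_FIELDS: list[str] = [
--     "id", "active", "closed", "startDate", "endDate", "enableOrderBook", "tokens",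
-- ]
--
-- OPTIONAL_FIELDS: list[str] = [
--     "question", "slug", "events",
-- ]
--
-- def summarize_shape(records):
--     """Shape summary: one key-set build, then O(1) membership per field."""
--     if not records:
--         return "  [WARN] No records returned from API."
--
--     seen = set()
--     for r in records:
--         seen |= set(r)
--
--     missing_required = [f for f in REQUIRED_FIELDS if f not in seen]
--     missing_optional = [f for f in OPTIONAL_FIELDS if f not in seen]
--
--     req_line = (
--         f"  [BREAKING DRIFT] Required fields absent from all records: {missing_required}"
--         if missing_required
--         else "  [OK] All required fields present in at least one record."
--     )
--     opt_line = (
--         f"  [EXPECTED DRIFT?] Optional fields absent from all records: {missing_optional}"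
--         if missing_optional
--         else "  [OK] All optional fields present."
--     )
--
--     return "\n".join([
--         f"  Records fetched   : {len(records)}",
--         f"  All top-level keys: {sorted(seen)}",
--         "",
--         req_line,
--         opt_line,
--     ])
-- ===== Notes on version B (the rewrite author's own statement) =====
-- stated objective: simpler
-- what changed: B builds the key set once and tests each required/optional field by a single set membership, eliminating A's helper functions that rescan every record for every field (the per-field any-over-records inner loop disappears) and the incremental lines.append accumulation.
import Mathlib
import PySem

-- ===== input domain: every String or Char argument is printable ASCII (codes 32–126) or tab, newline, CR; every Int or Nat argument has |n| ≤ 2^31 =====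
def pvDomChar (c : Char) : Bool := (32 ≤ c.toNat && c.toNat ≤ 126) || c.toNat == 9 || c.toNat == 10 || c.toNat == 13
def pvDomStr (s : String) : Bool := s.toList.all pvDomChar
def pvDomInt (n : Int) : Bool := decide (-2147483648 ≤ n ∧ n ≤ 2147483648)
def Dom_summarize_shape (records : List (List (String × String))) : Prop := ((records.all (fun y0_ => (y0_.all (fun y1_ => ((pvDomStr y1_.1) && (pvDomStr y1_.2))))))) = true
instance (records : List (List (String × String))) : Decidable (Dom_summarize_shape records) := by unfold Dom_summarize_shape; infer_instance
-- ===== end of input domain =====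

-- B replaces A's per-field rescans of all records by one membership test against the
-- key set A already builds (objective: simpler; the inner any-over-records loop disappears).

-- ===== PORT A =====

def REQUIRED_FIELDS : List String :=
  ["id", "active", "closed", "startDate", "endDate", "enableOrderBook", "tokens"]

def OPTIONAL_FIELDS : List String :=
  ["question", "slug", "events"]

-- Python repr(s) for a str, exact on the Dom character set (printable ASCII, tab, LF, CR):
-- single quotes unless the string contains ' and no "; escapes \\, the quote, \t, \n, \r.
def pyStrRepr (s : String) : String :=
  let cs := s.toList
  let q : Char := if cs.contains '\'' && !(cs.contains '"') then '"' else '\''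
  String.ofList ([q] ++ cs.flatMap (fun c =>
    if c = '\\' then ['\\', '\\']
    else if c = q then ['\\', q]
    else if c = '\t' then ['\\', 't']
    else if c = '\n' then ['\\', 'n']
    else if c = '\r' then ['\\', 'r']
    else [c]) ++ [q])

-- Python f"{xs}" for a list[str]: bracketed, ", "-separated reprs.
def pyStrListRepr (xs : List String) : String :=
  PySem.Str.join "" ["[", PySem.Str.join ", " (xs.map pyStrRepr), "]"]

def check_required_fields (records : List (List (String × String))) : List String :=
  if records = [] then REQUIRED_FIELDS
  else REQUIRED_FIELDS.filter (fun f =>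
    !(records.any (fun r => (PySem.Dict.ofList r).contains f)))

def check_optional_fields (records : List (List (String × String))) : List String :=
  if records = [] then OPTIONAL_FIELDS
  else OPTIONAL_FIELDS.filter (fun f =>
    !(records.any (fun r => (PySem.Dict.ofList r).contains f)))

def summarize_shape (records : List (List (String × String))) : String :=
  if records = [] then "  [WARN] No records returned from API."
  else
    let all_keys : PySem.Set String :=
      records.foldl (fun s r => PySem.Set.union s (PySem.Set.ofList (PySem.Dict.ofList r).keys)) PySem.Set.empty
    let lines : List String :=
      [PySem.Str.join "" ["  Records fetched   : ", PySem.Int.toStr (records.length : Int)],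
       PySem.Str.join "" ["  All top-level keys: ", pyStrListRepr (PySem.List.sorted all_keys (fun x => x) false)],
       ""]
    let missing_required := check_required_fields records
    let lines := lines ++
      (if missing_required ≠ [] then
        [PySem.Str.join "" ["  [BREAKING DRIFT] Required fields absent from all records: ", pyStrListRepr missing_required]]
       else ["  [OK] All required fields present in at least one record."])
    let missing_optional := check_optional_fields records
    let lines := lines ++
      (if missing_optional ≠ [] then
        [PySem.Str.join "" ["  [EXPECTED DRIFT?] Optional fields absent from all records: ", pyStrListRepr missing_optional]]
       else ["  [OK] All optional fields present."])
    PySem.Str.join "\n" lines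

-- ===== PORT B =====

def summarize_shape_alt (records : List (List (String × String))) : String :=
  if records = [] then "  [WARN] No records returned from API."
  else
    let seen : PySem.Set String :=
      records.foldl (fun s r => PySem.Set.union s (PySem.Set.ofList (PySem.Dict.ofList r).keys)) PySem.Set.empty
    let missing_required := REQUIRED_FIELDS.filter (fun f => !(PySem.Set.contains seen f))
    let missing_optional := OPTIONAL_FIELDS.filter (fun f => !(PySem.Set.contains seen f))
    let req_line :=
      if missing_required ≠ [] then
        PySem.Str.join "" ["  [BREAKING DRIFT] Required fields absent from all records: ", pyStrListRepr missing_required]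
      else "  [OK] All required fields present in at least one record."
    let opt_line :=
      if missing_optional ≠ [] then
        PySem.Str.join "" ["  [EXPECTED DRIFT?] Optional fields absent from all records: ", pyStrListRepr missing_optional]
      else "  [OK] All optional fields present."
    PySem.Str.join "\n"
      [PySem.Str.join "" ["  Records fetched   : ", PySem.Int.toStr (records.length : Int)],
       PySem.Str.join "" ["  All top-level keys: ", pyStrListRepr (PySem.List.sorted seen (fun x => x) false)],
       "",
       req_line,
       opt_line]

-- ===== PRECONDITION & SPEC =====
def Spec_summarize_shape (records : List (List (String × String))) (out : String) : Prop := out = summarize_shape_alt records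
instance (records : List (List (String × String))) (out : String) : Decidable (Spec_summarize_shape records out) := by unfold Spec_summarize_shape; infer_instance

-- ===== CLAIM (what is proved, stated in full; the proofs are below) =====
def Claim_equal_summarize_shape : Prop := ∀ (records : List (List (String × String))), Dom_summarize_shape records → Spec_summarize_shape records (summarize_shape records)

-- ===== LEMMAS AND PROOFS =====

-- membership in the accumulated key set = some record contains the key
lemma contains_keyfold (records : List (List (String × String))) (s0 : PySem.Set String) (f : String) :
    PySem.Set.contains
      (records.foldl (fun s r => PySem.Set.union s (PySem.Set.ofList (PySem.Dict.ofList r).keys)) s0) f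
    = (PySem.Set.contains s0 f || records.any (fun r => (PySem.Dict.ofList r).contains f)) := by
  induction records generalizing s0 with
  | nil => simp
  | cons r rs ih =>
    simp only [List.foldl_cons, List.any_cons, ih]
    simp [PySem.Set.mem_union, PySem.Set.mem_ofList,
          PySem.Dict.contains_eq_decide_mem_keys, Bool.or_assoc]

lemma missing_eq (fields : List String) (records : List (List (String × String))) :
    fields.filter (fun f => !(records.any (fun r => (PySem.Dict.ofList r).contains f)))
    = fields.filter (fun f =>
        !(PySem.Set.contains
            (records.foldl (fun s r => PySem.Set.union s (PySem.Set.ofList (PySem.Dict.ofList r).keys)) PySem.Set.empty) f)) := by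
  apply List.filter_congr
  intro f _
  rw [contains_keyfold]
  simp [PySem.Set.empty]

-- ===== VERDICT (by name: the statement is the Claim_ definition above) =====
theorem summarize_shape_spec : Claim_equal_summarize_shape := by
  intro records _
  unfold Spec_summarize_shape summarize_shape summarize_shape_alt check_required_fields check_optional_fields
  by_cases h : records = []
  · simp [h]
  · simp only [h, if_false]
    rw [missing_eq REQUIRED_FIELDS records, missing_eq OPTIONAL_FIELDS records]
    apply congrArg
    split_ifs <;> rfl
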